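-- pv_equiv track=rewrite | github.com/ukonline/CodeExamples | python/PythonOptimisation/chapter2/collections-module.py | split_numbers_2
-- ===== SOURCE A (Python) =====
-- from collections import deque
--
-- def split_numbers_2(data):
--     result = deque()
--     for d in data:
--         if d < 0:
--             result.appendleft(d)
--         else:
--             result.append(d)
--     return list(result)
-- ===== SOURCE B (Python) =====
-- def split_numbers_2(data):
--     neg = [d for d in data if d < 0]
--     pos = [d for d in data if d >= 0]
--     return neg[::-1] + pos
-- ===== Notes on version B (the rewrite author's own statement) =====
-- stated objective: idiomatic
-- what changed: Replaced the single deque pass with front/back insertion by two filter comprehensions and a reverse-concatenation: reversed negatives followed by non-negatives.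
import Mathlib
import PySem

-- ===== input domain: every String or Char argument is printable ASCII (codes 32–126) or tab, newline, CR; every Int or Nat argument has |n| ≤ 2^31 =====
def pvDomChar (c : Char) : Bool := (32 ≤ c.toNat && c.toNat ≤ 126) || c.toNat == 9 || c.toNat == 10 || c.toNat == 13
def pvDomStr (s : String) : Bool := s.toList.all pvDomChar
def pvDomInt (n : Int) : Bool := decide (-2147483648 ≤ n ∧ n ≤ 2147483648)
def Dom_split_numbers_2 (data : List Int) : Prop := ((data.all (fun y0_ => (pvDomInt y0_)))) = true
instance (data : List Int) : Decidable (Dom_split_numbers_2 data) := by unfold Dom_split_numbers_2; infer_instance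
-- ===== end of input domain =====

-- B replaces A's single deque pass (appendleft/append) with two filters and a
-- reverse-concatenation; same result, idiomatic decomposition.

-- ===== PORT A =====
-- The deque is modelled as a pair (front, back): appendleft pushes onto front
-- (head = most recently appendleft'd element), append pushes onto the end of
-- back; list(result) = front ++ back. The loop is a fold over data.
def split_numbers_2 (data : List Int) : List Int :=
  let result := data.foldl
    (fun (st : List Int × List Int) d =>
      if d < 0 then (d :: st.1, st.2) else (st.1, st.2 ++ [d]))
    ([], [])
  result.1 ++ result.2

-- ===== PORT B =====
def split_numbers_2_alt (data : List Int) : List Int :=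
  let neg := data.filter (fun d => d < 0)
  let pos := data.filter (fun d => d ≥ 0)
  neg.reverse ++ pos

-- ===== PRECONDITION & SPEC =====
def Spec_split_numbers_2 (data : List Int) (out : List Int) : Prop := out = split_numbers_2_alt data
instance (data : List Int) (out : List Int) : Decidable (Spec_split_numbers_2 data out) := by unfold Spec_split_numbers_2; infer_instance

-- ===== CLAIM (what is proved, stated in full; the proofs are below) =====
def Claim_equal_split_numbers_2 : Prop := ∀ (data : List Int), Dom_split_numbers_2 data → Spec_split_numbers_2 data (split_numbers_2 data)

-- ===== LEMMAS AND PROOFS =====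
-- Loop invariant: the fold prepends the reversed negatives to front and
-- appends the non-negatives to back.
theorem split_numbers_2_loop (data front back : List Int) :
    data.foldl
      (fun (st : List Int × List Int) d =>
        if d < 0 then (d :: st.1, st.2) else (st.1, st.2 ++ [d]))
      (front, back)
    = ((data.filter (fun d => d < 0)).reverse ++ front,
       back ++ data.filter (fun d => d ≥ 0)) := by
  induction data generalizing front back with
  | nil => simp
  | cons d rest ih =>
    by_cases h : d < 0
    · simp [List.foldl_cons, h, ih,
        show ¬ d ≥ 0 by omega]
    · simp [List.foldl_cons, h, ih,
        show d ≥ 0 by omega]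

-- ===== VERDICT (by name: the statement is the Claim_ definition above) =====
theorem split_numbers_2_spec : Claim_equal_split_numbers_2 := by
  intro data _
  unfold Spec_split_numbers_2 split_numbers_2 split_numbers_2_alt
  simp [split_numbers_2_loop]
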